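-- pv_equiv track=rewrite | github.com/UPCArtifacts/xTestCluster | tool_xTestCluster/src/FindDuplicatePatches.py | compare_hunks
-- ===== SOURCE A (Python) =====
-- def clean_hunks(hunk):
--     cleaned_hunk = list()
--     for line in hunk:
--         if line.startswith('+'):
--             line = line[1:]
--             if line.startswith(' '):
--                 line.strip()
--                 line = line.lstrip()
--
--             if line.startswith('//'):
--                 continue
--
--             line = '+' + line
--             if line.endswith('\n'):
--                 line = line[:-1]
--             cleaned_hunk.append(line)
--             continue
--
--         if line.endswith('\n'):
--             line = line[:-1]
--         cleaned_hunk.append(line)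
--
--     return cleaned_hunk
--
-- def compare_hunks(hunk_key, hunk_search):
--     hunk_key = clean_hunks(hunk_key)
--     hunk_search = clean_hunks(hunk_search)
--
--     for line_index in range(0, len(hunk_key)):
--         line_key = hunk_key[line_index]
--         if line_index >= len(hunk_search):
--             if line_key.startswith('+') or line_key.startswith('-'):
--                 return False
--
--             continue
--
--         line_search = hunk_search[line_index]
--
--         if line_key != line_search:
--             return False
--
--     if len(hunk_search) > len(hunk_key):
--         for trailing_index in range(len(hunk_key), len(hunk_search)):
--             line_search = hunk_search[trailing_index]
--             if line_search.startswith('+') or line_search.startswith('-'):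
--                 return False
--
--     return True
-- ===== SOURCE B (Python) =====
-- def _clean(line):
--     """Clean one raw hunk line; None means the line is dropped ('//' in a '+' line)."""
--     if line.startswith('+'):
--         rest = line[1:]
--         if rest.startswith(' '):
--             rest = rest.lstrip()
--         if rest.startswith('//'):
--             return None
--         line = '+' + rest
--     return line[:-1] if line.endswith('\n') else line
--
-- def compare_hunks(hunk_key, hunk_search):
--     # Fused streaming comparison: cleaning and comparing happen in one lazy pass,
--     # no intermediate cleaned lists are ever built.
--     it_k, it_s = iter(hunk_key), iter(hunk_search)
--
--     def next_clean(it):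
--         for raw in it:
--             c = _clean(raw)
--             if c is not None:
--                 return c
--         return None
--
--     while True:
--         k = next_clean(it_k)
--         s = next_clean(it_s)
--         if k is None and s is None:
--             return True
--         if k is None or s is None:
--             rem, it = (s, it_s) if k is None else (k, it_k)
--             while rem is not None:
--                 if rem.startswith('+') or rem.startswith('-'):
--                     return False
--                 rem = next_clean(it)
--             return True
--         if k != s:
--             return False
-- ===== Notes on version B (the rewrite author's own statement) =====
-- stated objective: alternative
-- what changed: B fuses cleaning and comparison into one lazy streaming pass over the two raw hunks (a next_clean iterator step skipping dropped lines), never materialising cleaned lists, with one symmetric remainder loop when either side runs out; A first builds both cleaned lists and then runs an asymmetric index loop plus a separate trailing loop.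
import Mathlib
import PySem

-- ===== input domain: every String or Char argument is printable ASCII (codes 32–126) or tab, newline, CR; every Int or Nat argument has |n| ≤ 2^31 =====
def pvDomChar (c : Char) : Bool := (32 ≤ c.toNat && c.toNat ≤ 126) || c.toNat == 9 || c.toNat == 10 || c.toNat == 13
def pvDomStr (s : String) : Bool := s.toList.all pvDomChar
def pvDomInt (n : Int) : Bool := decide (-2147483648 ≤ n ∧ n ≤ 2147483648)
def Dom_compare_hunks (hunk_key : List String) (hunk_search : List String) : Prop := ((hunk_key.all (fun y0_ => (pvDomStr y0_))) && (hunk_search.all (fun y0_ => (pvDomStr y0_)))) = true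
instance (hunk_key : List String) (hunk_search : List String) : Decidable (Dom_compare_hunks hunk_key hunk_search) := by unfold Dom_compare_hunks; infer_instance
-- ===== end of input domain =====

-- B fuses cleaning and comparison into one lazy streaming pass over the raw hunks
-- (no intermediate cleaned lists), with a symmetric remainder check; objective: alternative.


-- ===== PORT A =====
-- clean_hunks: accumulating loop over the hunk, step for step
def cleanHunksA : List String → List String
  | [] => []
  | line :: rest =>
    if PySem.Str.startswith line "+" then
      let l1 := PySem.Str.slice line (some 1) none
      let l2 := if PySem.Str.startswith l1 " " then PySem.Str.lstrip l1 else l1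
      if PySem.Str.startswith l2 "//" then cleanHunksA rest
      else
        let l3 := "+" ++ l2
        let l4 := if PySem.Str.endswith l3 "\n" then PySem.Str.slice l3 none (some (-1)) else l3
        l4 :: cleanHunksA rest
    else
      let l1 := if PySem.Str.endswith line "\n" then PySem.Str.slice line none (some (-1)) else line
      l1 :: cleanHunksA rest

-- the main index loop: walk key, indexing into search; search exhausted ⇒ +/- check on key line
def loopA : List String → List String → Bool
  | [], _ => true
  | k :: ks, [] =>
    if PySem.Str.startswith k "+" || PySem.Str.startswith k "-" then false else loopA ks []
  | k :: ks, s :: ss =>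
    if k ≠ s then false else loopA ks ss

-- the trailing loop over search beyond len(key)
def trailA : List String → Bool
  | [] => true
  | l :: ls =>
    if PySem.Str.startswith l "+" || PySem.Str.startswith l "-" then false else trailA ls

def compare_hunks (hunk_key : List String) (hunk_search : List String) : Bool :=
  let ck := cleanHunksA hunk_key
  let cs := cleanHunksA hunk_search
  if loopA ck cs then
    if cs.length > ck.length then trailA (cs.drop ck.length) else true
  else false

-- ===== PORT B =====
-- _clean: clean one raw line; none = line dropped
def cleanB (line : String) : Option String :=
  let line' :=
    if PySem.Str.startswith line "+" then
      let rest := PySem.Str.slice line (some 1) none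
      let rest := if PySem.Str.startswith rest " " then PySem.Str.lstrip rest else rest
      if PySem.Str.startswith rest "//" then none
      else some ("+" ++ rest)
    else some line
  match line' with
  | none => none
  | some l =>
    some (if PySem.Str.endswith l "\n" then PySem.Str.slice l none (some (-1)) else l)

-- next_clean: advance the iterator to the next kept (cleaned) line, returning it with the rest
def nextCleanB : List String → Option (String × List String)
  | [] => none
  | raw :: it =>
    match cleanB raw with
    | some c => some (c, it)
    | none => nextCleanB it

theorem nextCleanB_length {xs : List String} {c : String} {rest : List String}
    (h : nextCleanB xs = some (c, rest)) : rest.length < xs.length := by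
  induction xs with
  | nil => simp [nextCleanB] at h
  | cons raw it ih =>
    simp only [nextCleanB] at h
    cases hc : cleanB raw with
    | some v => rw [hc] at h; simp at h; simpa [h.2] using Nat.lt_succ_self it.length
    | none => rw [hc] at h; exact Nat.lt_trans (ih h) (Nat.lt_succ_self _)

-- the inner remainder loop: rem is the current cleaned line, it the rest of that iterator
def remLoopB (rem : String) (it : List String) : Bool :=
  if PySem.Str.startswith rem "+" || PySem.Str.startswith rem "-" then false
  else
    match h : nextCleanB it with
    | none => true
    | some (c, rest) => remLoopB c rest
termination_by it.length
decreasing_by exact nextCleanB_length h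

-- the outer while-True loop of B
def mainLoopB (itk its : List String) : Bool :=
  match hk : nextCleanB itk, hs : nextCleanB its with
  | none, none => true
  | none, some (s, rest) => remLoopB s rest
  | some (k, rest), none => remLoopB k rest
  | some (k, rk), some (s, rs) => if k ≠ s then false else mainLoopB rk rs
termination_by itk.length + its.length
decreasing_by exact Nat.add_lt_add (nextCleanB_length hk) (nextCleanB_length hs)

def compare_hunks_alt (hunk_key : List String) (hunk_search : List String) : Bool :=
  mainLoopB hunk_key hunk_search

-- ===== PRECONDITION & SPEC =====
def Spec_compare_hunks (hunk_key : List String) (hunk_search : List String) (out : Bool) : Prop := out = compare_hunks_alt hunk_key hunk_search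
instance (hunk_key : List String) (hunk_search : List String) (out : Bool) : Decidable (Spec_compare_hunks hunk_key hunk_search out) := by unfold Spec_compare_hunks; infer_instance

-- ===== CLAIM (what is proved, stated in full; the proofs are below) =====
def Claim_equal_compare_hunks : Prop := ∀ (hunk_key : List String) (hunk_search : List String), Dom_compare_hunks hunk_key hunk_search → Spec_compare_hunks hunk_key hunk_search (compare_hunks hunk_key hunk_search)

-- ===== LEMMAS AND PROOFS =====

theorem ite_of_false {A : Type} (c : Bool) [Decidable (c = true)] (h : c = false) (a b : A) :
    (if c = true then a else b) = b := by
  subst h; exact if_neg Bool.false_ne_true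

-- case lemmas for cleanB
theorem cleanB_skip (line : String)
    (hp : PySem.Str.startswith line "+" = true)
    (h2 : PySem.Str.startswith (if PySem.Str.startswith (PySem.Str.slice line (some 1)) " " = true then PySem.Str.lstrip (PySem.Str.slice line (some 1)) else PySem.Str.slice line (some 1)) "//" = true) :
    cleanB line = none := by
  unfold cleanB
  rw [if_pos hp, if_pos h2]

theorem cleanB_plus (line : String)
    (hp : PySem.Str.startswith line "+" = true)
    (h2 : ¬ PySem.Str.startswith (if PySem.Str.startswith (PySem.Str.slice line (some 1)) " " = true then PySem.Str.lstrip (PySem.Str.slice line (some 1)) else PySem.Str.slice line (some 1)) "//" = true) :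
    cleanB line =
      some (let l3 := "+" ++ (if PySem.Str.startswith (PySem.Str.slice line (some 1)) " " = true then PySem.Str.lstrip (PySem.Str.slice line (some 1)) else PySem.Str.slice line (some 1));
            if PySem.Str.endswith l3 "\n" = true then PySem.Str.slice l3 none (some (-1)) else l3) := by
  unfold cleanB
  rw [if_pos hp, if_neg h2]

theorem cleanB_other (line : String)
    (hp : PySem.Str.startswith line "+" = false) :
    cleanB line =
      some (if PySem.Str.endswith line "\n" = true then PySem.Str.slice line none (some (-1)) else line) := by
  unfold cleanB
  rw [ite_of_false _ hp]

-- A's clean_hunks is the per-line cleaning of B, line by line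
theorem cleanA_eq_filterMap (h : List String) : cleanHunksA h = h.filterMap cleanB := by
  induction h with
  | nil => rfl
  | cons line rest ih =>
    rw [List.filterMap_cons]
    by_cases hp : PySem.Str.startswith line "+" = true
    · by_cases h2 : PySem.Str.startswith (if PySem.Str.startswith (PySem.Str.slice line (some 1)) " " = true then PySem.Str.lstrip (PySem.Str.slice line (some 1)) else PySem.Str.slice line (some 1)) "//" = true
      · rw [cleanB_skip line hp h2]
        simp only [cleanHunksA]
        rw [if_pos hp, if_pos h2, ih]
      · rw [cleanB_plus line hp h2]
        simp only [cleanHunksA]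
        rw [if_pos hp, if_neg h2, ih]
    · have hp' : PySem.Str.startswith line "+" = false := Bool.eq_false_iff.mpr hp
      rw [cleanB_other line hp']
      simp only [cleanHunksA]
      rw [ite_of_false _ hp', ih]

def pmFun : String → Bool := fun l => PySem.Str.startswith l "+" || PySem.Str.startswith l "-"

theorem trailA_cons (l : String) (ls : List String) :
    trailA (l :: ls) = if pmFun l = true then false else trailA ls := rfl

-- reference comparison of two CLEANED lists
def cmpRef : List String → List String → Bool
  | [], b => trailA b
  | a, [] => trailA a
  | k :: ks, s :: ss => if k = s then cmpRef ks ss else false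

theorem loopA_nil_right (a : List String) : loopA a [] = trailA a := by
  induction a with
  | nil => rfl
  | cons k ks ih => simp only [loopA, trailA, ih]

-- A's comparison of two cleaned lists equals cmpRef
theorem A_eq_cmpRef (a b : List String) :
    (if loopA a b then (if b.length > a.length then trailA (b.drop a.length) else true) else false)
      = cmpRef a b := by
  induction a generalizing b with
  | nil =>
    cases b with
    | nil => rfl
    | cons s ss => simp [loopA, cmpRef]
  | cons k ks ih =>
    cases b with
    | nil =>
      have hlen : ¬ (List.length ([] : List String) > (k :: ks).length) := by simp
      have hcmp : cmpRef (k :: ks) [] = trailA (k :: ks) := rfl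
      rw [if_neg hlen, loopA_nil_right, hcmp]
      cases trailA (k :: ks) <;> rfl
    | cons s ss =>
      simp only [loopA, cmpRef, List.length_cons, List.drop_succ_cons]
      by_cases h : k = s
      · simp only [h, ne_eq, not_true_eq_false, Bool.false_eq_true, if_false, if_true,
          Nat.add_lt_add_iff_right]
        exact ih ss
      · simp [h]

-- nextCleanB computes the head of the filterMap view
theorem filterMap_nextCleanB (xs : List String) :
    xs.filterMap cleanB = (match nextCleanB xs with
      | none => []
      | some (c, rest) => c :: rest.filterMap cleanB) := by
  induction xs with
  | nil => rfl
  | cons raw it ih =>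
    rw [List.filterMap_cons]
    cases hc : cleanB raw with
    | some v => simp [nextCleanB, hc]
    | none => simp only [nextCleanB, hc, ih]

theorem remLoopB_eq (rem : String) (it : List String) :
    remLoopB rem it = trailA (rem :: it.filterMap cleanB) := by
  rw [remLoopB, trailA_cons]
  by_cases hp : pmFun rem = true
  · have hp' : (PySem.Str.startswith rem "+" || PySem.Str.startswith rem "-") = true := hp
    rw [if_pos hp', if_pos hp]
  · have hp' : (PySem.Str.startswith rem "+" || PySem.Str.startswith rem "-") = false :=
      Bool.eq_false_iff.mpr hp
    rw [ite_of_false _ hp', if_neg hp, filterMap_nextCleanB it]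
    cases h : nextCleanB it with
    | none => rfl
    | some p =>
      cases p with
      | mk c rest => exact remLoopB_eq c rest
termination_by it.length
decreasing_by exact nextCleanB_length h

theorem mainLoopB_eq (itk its : List String) :
    mainLoopB itk its = cmpRef (itk.filterMap cleanB) (its.filterMap cleanB) := by
  rw [mainLoopB, filterMap_nextCleanB itk, filterMap_nextCleanB its]
  cases hk : nextCleanB itk with
  | none =>
    cases hs : nextCleanB its with
    | none => rfl
    | some p =>
      cases p with
      | mk s rest => rw [show cmpRef [] (s :: rest.filterMap cleanB) = trailA (s :: rest.filterMap cleanB) from rfl]; exact remLoopB_eq s rest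
  | some p =>
    cases p with
    | mk k rk =>
      cases hs : nextCleanB its with
      | none =>
        rw [show cmpRef (k :: rk.filterMap cleanB) [] = trailA (k :: rk.filterMap cleanB) from rfl]
        exact remLoopB_eq k rk
      | some q =>
        cases q with
        | mk s rs =>
          simp only [cmpRef]
          by_cases h : k = s
          · rw [if_neg (by simpa using h), if_pos h]
            exact mainLoopB_eq rk rs
          · rw [if_pos h, if_neg h]
termination_by itk.length + its.length
decreasing_by exact Nat.add_lt_add (nextCleanB_length hk) (nextCleanB_length hs)

-- ===== VERDICT (by name: the statement is the Claim_ definition above) =====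
theorem compare_hunks_spec : Claim_equal_compare_hunks := by
  intro hunk_key hunk_search _
  unfold Spec_compare_hunks compare_hunks compare_hunks_alt
  simp only [cleanA_eq_filterMap, mainLoopB_eq]
  exact A_eq_cmpRef _ _
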